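-- pv_equiv track=rewrite | github.com/MasterJuke/FLB-ACI-Automation-App | aci_port_utils.py | filter_policy_groups_by_criteria
-- ===== SOURCE A (Python) =====
-- def filter_policy_groups_by_criteria(policy_groups, link_level=None, aep=None):
--     """
--     Filter policy groups by link level and/or AEP.
--
--     Matching logic:
--       - Exact match on link_level name if provided
--       - Exact match on AEP name if provided
--       - If neither provided, returns all
--
--     Returns (exact_matches, partial_matches):
--       - exact_matches: PGs matching ALL provided criteria
--       - partial_matches: PGs matching link_level only (if AEP also specified)
--     """
--     if not link_level and not aep:
--         return policy_groups, []
--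
--     exact = []
--     partial = []
--
--     for pg in policy_groups:
--         ll_match = (not link_level) or (pg.get("link_level", "") == link_level)
--         aep_match = (not aep) or (pg.get("aep", "") == aep)
--
--         if ll_match and aep_match:
--             exact.append(pg)
--         elif ll_match and aep and not aep_match:
--             partial.append(pg)
--
--     return exact, partial
-- ===== SOURCE B (Python) =====
-- def filter_policy_groups_by_criteria(policy_groups, link_level=None, aep=None):
--     if not link_level and not aep:
--         return policy_groups, []
--     if link_level:
--         candidates = [pg for pg in policy_groups if pg.get("link_level", "") == link_level]
--     else:
--         candidates = policy_groups
--     if aep: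
--         exact = [pg for pg in candidates if pg.get("aep", "") == aep]
--         partial = [pg for pg in candidates if pg.get("aep", "") != aep]
--     else:
--         exact = candidates
--         partial = []
--     return exact, partial
-- ===== Notes on version B (the rewrite author's own statement) =====
-- stated objective: simpler
-- what changed: Replaces the single accumulator loop with per-branch logic by a two-phase decomposition: first select link_level candidates in one filter pass, then split candidates by aep with two comprehensions (or return them directly when aep is absent).
import Mathlib
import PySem

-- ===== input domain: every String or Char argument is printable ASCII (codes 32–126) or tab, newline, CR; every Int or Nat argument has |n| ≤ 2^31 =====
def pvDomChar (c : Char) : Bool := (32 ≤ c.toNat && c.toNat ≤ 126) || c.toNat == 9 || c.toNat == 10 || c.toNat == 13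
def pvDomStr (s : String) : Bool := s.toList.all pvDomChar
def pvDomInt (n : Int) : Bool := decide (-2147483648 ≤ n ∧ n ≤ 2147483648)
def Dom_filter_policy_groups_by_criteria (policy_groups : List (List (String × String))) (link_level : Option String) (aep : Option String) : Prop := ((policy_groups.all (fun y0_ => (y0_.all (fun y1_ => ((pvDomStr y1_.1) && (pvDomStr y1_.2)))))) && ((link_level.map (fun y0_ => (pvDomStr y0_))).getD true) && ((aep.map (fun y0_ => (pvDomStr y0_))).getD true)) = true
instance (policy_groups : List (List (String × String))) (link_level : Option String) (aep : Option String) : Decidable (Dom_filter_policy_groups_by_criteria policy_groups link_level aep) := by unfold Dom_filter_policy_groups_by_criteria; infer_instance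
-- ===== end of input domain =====

-- B: two-phase decomposition (filter link_level candidates, then split by aep) instead of A's single accumulator loop; same results, simpler.


-- ===== PORT A =====
def pvTruthy (o : Option String) : Bool :=
  match o with
  | none => false
  | some s => !(s == "")

-- pg.get(k, "") : first-match lookup in the association list (Python dicts have unique keys)
def pvGetD (pg : List (String × String)) (k : String) : String :=
  ((pg.find? (fun kv => kv.1 == k)).map (·.2)).getD ""

def filter_policy_groups_by_criteria (policy_groups : List (List (String × String))) (link_level : Option String) (aep : Option String) : (List (List (String × String))) × (List (List (String × String))) :=
  if !pvTruthy link_level && !pvTruthy aep then (policy_groups, [])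
  else
    policy_groups.foldl (fun (st : List (List (String × String)) × List (List (String × String))) pg =>
      let ll_match := !pvTruthy link_level || (some (pvGetD pg "link_level") == link_level)
      let aep_match := !pvTruthy aep || (some (pvGetD pg "aep") == aep)
      if ll_match && aep_match then (st.1 ++ [pg], st.2)
      else if ll_match && pvTruthy aep && !aep_match then (st.1, st.2 ++ [pg])
      else st) ([], [])

-- ===== PORT B =====
def filter_policy_groups_by_criteria_alt (policy_groups : List (List (String × String))) (link_level : Option String) (aep : Option String) : (List (List (String × String))) × (List (List (String × String))) :=
  if !pvTruthy link_level && !pvTruthy aep then (policy_groups, [])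
  else
    let candidates :=
      if pvTruthy link_level then
        policy_groups.filter (fun pg => some (pvGetD pg "link_level") == link_level)
      else policy_groups
    if pvTruthy aep then
      (candidates.filter (fun pg => some (pvGetD pg "aep") == aep),
       candidates.filter (fun pg => !(some (pvGetD pg "aep") == aep)))
    else (candidates, [])

-- ===== PRECONDITION & SPEC =====
def Spec_filter_policy_groups_by_criteria (policy_groups : List (List (String × String))) (link_level : Option String) (aep : Option String) (out : (List (List (String × String))) × (List (List (String × String)))) : Prop := out = filter_policy_groups_by_criteria_alt policy_groups link_level aep
instance (policy_groups : List (List (String × String))) (link_level : Option String) (aep : Option String) (out : (List (List (String × String))) × (List (List (String × String)))) : Decidable (Spec_filter_policy_groups_by_criteria policy_groups link_level aep out) := by unfold Spec_filter_policy_groups_by_criteria; infer_instance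

-- ===== CLAIM (what is proved, stated in full; the proofs are below) =====
def Claim_equal_filter_policy_groups_by_criteria : Prop := ∀ (policy_groups : List (List (String × String))) (link_level : Option String) (aep : Option String), Dom_filter_policy_groups_by_criteria policy_groups link_level aep → Spec_filter_policy_groups_by_criteria policy_groups link_level aep (filter_policy_groups_by_criteria policy_groups link_level aep)

-- ===== LEMMAS AND PROOFS =====

-- A's loop, generalised over the accumulator: it appends the p-matches to st.1 and,
-- among the rest, the q-matches to st.2.
theorem foldl_split {α : Type} (p q : α → Bool) (l : List α) (st : List α × List α) :
    l.foldl (fun st x => if p x then (st.1 ++ [x], st.2)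
                         else if q x then (st.1, st.2 ++ [x]) else st) st
      = (st.1 ++ l.filter p, st.2 ++ l.filter (fun x => !p x && q x)) := by
  induction l generalizing st with
  | nil => simp
  | cons a t ih =>
    simp only [List.foldl_cons, List.filter_cons]
    by_cases hp : p a
    · simp [hp, ih]
    · by_cases hq : q a <;> simp [hp, hq, ih]

-- ===== VERDICT (by name: the statement is the Claim_ definition above) =====
theorem filter_policy_groups_by_criteria_spec : Claim_equal_filter_policy_groups_by_criteria := by
  intro pgs ll aep _
  unfold Spec_filter_policy_groups_by_criteria
  unfold filter_policy_groups_by_criteria filter_policy_groups_by_criteria_alt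
  by_cases h : (!pvTruthy ll && !pvTruthy aep) = true
  · simp [h]
  · rw [if_neg (by simp [h]), if_neg (by simp [h]), foldl_split]
    simp only [List.nil_append]
    by_cases hl : pvTruthy ll <;> by_cases ha : pvTruthy aep
    · -- both provided
      simp only [hl, ha, Bool.not_true, Bool.false_or, if_true, Prod.mk.injEq,
        List.filter_filter]
      refine ⟨List.filter_congr fun x _ => ?_, List.filter_congr fun x _ => ?_⟩ <;>
        (cases hx : (some (pvGetD x "link_level") == ll) <;>
         cases hy : (some (pvGetD x "aep") == aep) <;> decide)
    · -- only link_level provided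
      simp [hl, ha]
    · -- only aep provided
      simp only [hl, ha, Bool.not_true, Bool.not_false, Bool.true_or, if_true,
        Prod.mk.injEq]
      refine ⟨List.filter_congr fun x _ => ?_, List.filter_congr fun x _ => ?_⟩ <;>
        (cases hy : (some (pvGetD x "aep") == aep) <;> decide)
    · -- neither provided: contradicts h
      exact absurd (by simp [hl, ha]) h
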